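-- pv_equiv track=rewrite | github.com/linglin666/string-diagonal | string_diagonal.py | string_diagonal_transcribe_reverse
-- ===== SOURCE A (Python) =====
-- import math
--
-- def string_diagonal_transcribe_reverse(text, width=None):
--     """
--     Transcribe a string using reverse diagonal traversal (top-right to bottom-left).
--
--     Args:
--         text (str): The input string to transcribe
--         width (int, optional): Width of the matrix. If None, uses square root of length
--
--     Returns:
--         str: The transcribed string read diagonally (reverse)
--
--     Example:
--         >>> string_diagonal_transcribe_reverse("HELLO")
--         'EHLOL'
--     """
--     if not text:
--         return ""
--
--     # Determine matrix dimensions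
--     if width is None:
--         width = int(math.ceil(math.sqrt(len(text))))
--
--     height = math.ceil(len(text) / width)
--
--     # Create matrix and fill it with the text
--     matrix = []
--     text_index = 0
--
--     for i in range(height):
--         row = []
--         for j in range(width):
--             if text_index < len(text):
--                 row.append(text[text_index])
--                 text_index += 1
--             else:
--                 row.append('')  # Empty cell for incomplete rows
--         matrix.append(row)
--
--     # Read diagonally (reverse - top-right to bottom-left)
--     result = []
--
--     # Start from top row (right to left)
--     for start_col in range(width - 1, -1, -1):
--         row, col = 0, start_col
--         while row < height and col >= 0:
--             if matrix[row][col]:  # Skip empty cells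
--                 result.append(matrix[row][col])
--             row += 1
--             col -= 1
--
--     # Start from right column (excluding top-right corner)
--     for start_row in range(1, height):
--         row, col = start_row, width - 1
--         while row < height and col >= 0:
--             if matrix[row][col]:  # Skip empty cells
--                 result.append(matrix[row][col])
--             row += 1
--             col -= 1
--
--     return ''.join(result)
-- ===== SOURCE B (Python) =====
-- import math
--
-- def string_diagonal_transcribe_reverse(text, width=None):
--     """Bucket characters by anti-diagonal sum in one pass (no matrix), then
--     emit the buckets in A's diagonal order: sums width-1..0, then width..width+height-2."""
--     if not text:
--         return ""
--     n = len(text)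
--     if width is None:
--         width = int(math.ceil(math.sqrt(n)))
--     height = -(-n // width)  # ceil(n / width); ZeroDivisionError for width == 0, like A
--     buckets = {}
--     for i, ch in enumerate(text):
--         r, c = divmod(i, width)
--         buckets.setdefault(r + c, []).append(ch)
--     order = list(range(width - 1, -1, -1)) + list(range(width, width + height - 1))
--     return ''.join(''.join(buckets.get(s, [])) for s in order)
-- ===== Notes on version B (the rewrite author's own statement) =====
-- stated objective: alternative
-- what changed: B never builds A's 2-D matrix or walks it diagonal by diagonal: a single enumerate/divmod pass buckets each character under its anti-diagonal sum r+c, and the buckets are then concatenated in A's emission order (sums width-1 down to 0, then width up to width+height-2).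
import Mathlib
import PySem

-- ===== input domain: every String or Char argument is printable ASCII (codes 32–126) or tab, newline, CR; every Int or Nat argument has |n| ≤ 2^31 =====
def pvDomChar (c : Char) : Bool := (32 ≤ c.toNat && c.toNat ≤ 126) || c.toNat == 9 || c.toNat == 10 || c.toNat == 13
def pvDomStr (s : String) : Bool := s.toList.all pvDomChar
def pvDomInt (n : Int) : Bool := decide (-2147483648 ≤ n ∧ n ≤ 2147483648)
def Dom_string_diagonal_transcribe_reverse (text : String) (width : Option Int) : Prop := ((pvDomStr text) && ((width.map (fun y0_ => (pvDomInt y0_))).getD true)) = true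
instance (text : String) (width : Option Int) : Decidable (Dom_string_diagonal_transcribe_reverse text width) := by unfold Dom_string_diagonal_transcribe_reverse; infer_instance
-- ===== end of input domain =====

-- B skips A's 2-D matrix: one pass buckets each character by its anti-diagonal sum r+c, then the
-- buckets are concatenated in A's diagonal order (alternative decomposition, similar cost).

-- ===== PORT A =====
-- int(math.ceil(math.sqrt(n))): exact on the admitted sizes (doubles are exact there)
def pvCeilSqrt (n : Nat) : Nat := if Nat.sqrt n * Nat.sqrt n = n then Nat.sqrt n else Nat.sqrt n + 1

-- inner 'for j in range(width)': builds one row, threading text_index; '' cells are `none`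
def pvARow (chars : List Char) (ti : Int) : Nat → List (Option Char) × Int
  | 0 => ([], ti)
  | k+1 =>
    if ti < (chars.length : Int) then
      let rest := pvARow chars (ti+1) k
      ((PySem.List.pyGet? chars ti) :: rest.1, rest.2)
    else
      let rest := pvARow chars ti k
      ((none : Option Char) :: rest.1, rest.2)

-- outer 'for i in range(height)'
def pvAMatrix (chars : List Char) (w : Nat) (ti : Int) : Nat → List (List (Option Char)) × Int
  | 0 => ([], ti)
  | k+1 =>
    let row := pvARow chars ti w
    let rest := pvAMatrix chars w row.2 k
    (row.1 :: rest.1, rest.2)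

-- 'while row < height and col >= 0'; the fuel (height at every call site) bounds the iterations
def pvAWalk (matrix : List (List (Option Char))) (h : Int) (row col : Int) : Nat → List Char
  | 0 => []
  | f+1 =>
    if row < h ∧ 0 ≤ col then
      match (PySem.List.pyGet? matrix row).bind (fun rw => PySem.List.pyGet? rw col) with
      | some (some c) => c :: pvAWalk matrix h (row+1) (col-1) f
      | _ => pvAWalk matrix h (row+1) (col-1) f
    else []

def string_diagonal_transcribe_reverse (text : String) (width : Option Int) : String :=
  let chars := text.toList
  if chars.isEmpty then "" else
    let w : Int := match width with
      | none => (pvCeilSqrt chars.length : Int)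
      | some v => v
    let n : Int := (chars.length : Int)
    let h : Int := -(PySem.Int.floordiv (-n) w)   -- math.ceil(len(text)/width), exact
    let matrix := (pvAMatrix chars w.toNat 0 h.toNat).1
    let part1 := (PySem.List.pyRange (w-1) (-1) (-1)).foldl
        (fun acc sc => acc ++ pvAWalk matrix h 0 sc h.toNat) []
    let part2 := (PySem.List.pyRange 1 h).foldl
        (fun acc sr => acc ++ pvAWalk matrix h sr (w-1) h.toNat) []
    String.ofList (part1 ++ part2)

-- ===== PORT B =====
-- divmod(i, w) summed: the anti-diagonal key of flat index i
def pvBRKey (w i : Int) : Int := PySem.Int.floordiv i w + PySem.Int.mod i w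

def string_diagonal_transcribe_reverse_alt (text : String) (width : Option Int) : String :=
  let chars := text.toList
  if chars.isEmpty then "" else
    let n : Int := (chars.length : Int)
    let w : Int := match width with
      | none => (pvCeilSqrt chars.length : Int)
      | some v => v
    let h : Int := -(PySem.Int.floordiv (-n) w)   -- -(-n // w) = ceil(n / w)
    let buckets := (PySem.List.enumerate chars).foldl
        (fun d p => d.modify (pvBRKey w p.1) [] (fun l => l ++ [p.2]))
        (PySem.Dict.empty : PySem.Dict Int (List Char))
    let order := PySem.List.pyRange (w-1) (-1) (-1) ++ PySem.List.pyRange w (w + h - 1)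
    String.ofList (order.foldl (fun acc s => acc ++ buckets.getD s []) [])

-- ===== PRECONDITION & SPEC =====
-- Pre_ excludes only nonempty text with width == 0, where the Python A raises ZeroDivisionError.
def Pre_string_diagonal_transcribe_reverse (text : String) (width : Option Int) : Prop :=
  text = "" ∨ width ≠ some 0
instance (text : String) (width : Option Int) : Decidable (Pre_string_diagonal_transcribe_reverse text width) := by unfold Pre_string_diagonal_transcribe_reverse; infer_instance

def pvWitness_string_diagonal_transcribe_reverse : String × Option Int := ("HELLO", none)

def Spec_string_diagonal_transcribe_reverse (text : String) (width : Option Int) (out : String) : Prop := out = string_diagonal_transcribe_reverse_alt text width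
instance (text : String) (width : Option Int) (out : String) : Decidable (Spec_string_diagonal_transcribe_reverse text width out) := by unfold Spec_string_diagonal_transcribe_reverse; infer_instance

-- ===== CLAIM (what is proved, stated in full; the proofs are below) =====
def Claim_equal_string_diagonal_transcribe_reverse : Prop := ∀ (text : String) (width : Option Int), Dom_string_diagonal_transcribe_reverse text width → Pre_string_diagonal_transcribe_reverse text width → Spec_string_diagonal_transcribe_reverse text width (string_diagonal_transcribe_reverse text width)

-- ===== LEMMAS AND PROOFS =====

-- the value of cell (r, c) of A's matrix as a function of its flat index r*w+c
def pvCell (chars : List Char) (idx : Int) : Option Char :=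
  if idx < (chars.length : Int) then PySem.List.pyGet? chars idx else none

def pvRowAt (chars : List Char) (w : Nat) (ti : Int) : List (Option Char) :=
  (List.range w).map (fun (j : Nat) => pvCell chars (ti + (j : Int)))

-- the diagonal of sum s, enumerated by row r (A's walk order)
def pvDiagR (chars : List Char) (w s r0 H : Int) : List Char :=
  (PySem.List.pyRange r0 H).filterMap (fun r =>
    if 0 ≤ s - r ∧ r * w + (s - r) < (chars.length : Int)
    then PySem.List.pyGet? chars (r * w + (s - r)) else none)

-- the diagonal of sum s, enumerated by flat index i (B's bucket content)
def pvBucket (chars : List Char) (w s : Int) : List Char :=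
  ((PySem.List.enumerate chars).filter (fun p => pvBRKey w p.1 == s)).map (·.2)

theorem pvCeilSqrt_pos (n : Nat) (h : 1 ≤ n) : 1 ≤ pvCeilSqrt n := by
  unfold pvCeilSqrt
  split
  · rename_i he
    rcases Nat.eq_zero_or_pos (Nat.sqrt n) with h0 | h1
    · rw [h0] at he; omega
    · exact h1
  · omega

theorem pvARow_eq (chars : List Char) (k : Nat) : ∀ (ti : Int), 0 ≤ ti → ti ≤ (chars.length : Int) →
    pvARow chars ti k = ((List.range k).map (fun (j : Nat) => pvCell chars (ti + (j : Int))), min (ti + k) (chars.length : Int)) := by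
  induction k with
  | zero => intro ti h0 hn; simp [pvARow]; omega
  | succ k ih =>
    intro ti h0 hn
    by_cases hlt : ti < (chars.length : Int)
    · rw [pvARow, if_pos hlt, ih (ti+1) (by omega) (by omega)]
      simp only [Prod.mk.injEq, List.range_succ_eq_map, List.map_map, List.map_cons]
      refine ⟨?_, by push_cast; omega⟩
      congr 1
      · simp [pvCell, hlt]
      · apply List.map_congr_left
        intro j _
        simp only [Function.comp]
        congr 1
        push_cast
        ring
    · have hte : ti = (chars.length : Int) := by omega
      rw [pvARow, if_neg hlt, ih ti h0 hn]
      simp only [Prod.mk.injEq, List.range_succ_eq_map, List.map_map, List.map_cons]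
      refine ⟨?_, by push_cast; omega⟩
      congr 1
      · simp [pvCell, hlt]
      · apply List.map_congr_left
        intro j _
        simp only [Function.comp, pvCell]
        rw [if_neg (by omega), if_neg (by push_cast; omega)]

theorem pvAMatrix_get (chars : List Char) (w k : Nat) : ∀ (ti : Int) (r : Nat), 0 ≤ ti → ti ≤ (chars.length : Int) → r < k →
    ((pvAMatrix chars w ti k).1)[r]? = some (pvRowAt chars w (min (ti + (r : Int) * (w : Int)) (chars.length : Int))) := by
  induction k with
  | zero => intro ti r _ _ hr; omega
  | succ k ih =>
    intro ti r h0 hn hr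
    rw [pvAMatrix]
    match r with
    | 0 =>
      simp only [List.getElem?_cons_zero, Option.some.injEq]
      rw [pvARow_eq chars w ti h0 hn]
      have hmin : min (ti + ((0:Nat) : Int) * (w : Int)) (chars.length : Int) = ti := by
        push_cast; omega
      rw [hmin]
      rfl
    | r+1 =>
      simp only [List.getElem?_cons_succ]
      rw [pvARow_eq chars w ti h0 hn]
      rw [ih (min (ti + w) (chars.length : Int)) r (by omega) (by omega) (by omega)]
      congr 2
      push_cast
      rw [show ((r:Int)+1) * (w:Int) = (r:Int)*(w:Int) + (w:Int) from by ring]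
      have hx : 0 ≤ (r : Int) * (w : Int) := by positivity
      generalize (r : Int) * (w : Int) = X at *
      omega

theorem pvCell_lookup (chars : List Char) (w h : Int) (hw : 0 < w)
    (r c : Int) (hr0 : 0 ≤ r) (hrh : r < h) (hc0 : 0 ≤ c) (hcw : c < w) :
    (PySem.List.pyGet? ((pvAMatrix chars w.toNat 0 h.toNat).1) r).bind (fun rw => PySem.List.pyGet? rw c)
      = some (pvCell chars (r * w + c)) := by
  rw [PySem.List.pyGet?_of_nonneg _ hr0]
  have hrw : ((r.toNat : Int)) = r := by omega
  have hww : ((w.toNat : Int)) = w := by omega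
  rw [pvAMatrix_get chars w.toNat h.toNat 0 r.toNat (by omega) (by omega) (by omega)]
  simp only [Option.bind_some, hrw, hww, zero_add]
  rw [PySem.List.pyGet?_of_nonneg _ hc0]
  unfold pvRowAt
  rw [List.getElem?_map, List.getElem?_range (by omega : c.toNat < w.toNat)]
  simp only [Option.map_some, Option.some.injEq]
  have hcc : ((c.toNat : Int)) = c := by omega
  rw [hcc]
  unfold pvCell
  have hX : 0 ≤ r * w := by positivity
  rcases le_or_gt (r * w) (chars.length : Int) with hle | hgt
  · rw [min_eq_left hle]
  · rw [min_eq_right (by omega)]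
    rw [if_neg (by omega), if_neg (by omega)]

theorem pvAWalk_eq (chars : List Char) (w h : Int) (matrix : List (List (Option Char)))
    (hM : ∀ r c : Int, 0 ≤ r → r < h → 0 ≤ c → c < w →
      (PySem.List.pyGet? matrix r).bind (fun rw => PySem.List.pyGet? rw c) = some (pvCell chars (r * w + c))) :
    ∀ (f : Nat) (r0 c : Int), 0 < w → 0 ≤ r0 → c < w → (h - r0).toNat ≤ f →
    pvAWalk matrix h r0 c f = pvDiagR chars w (r0 + c) r0 h := by
  intro f
  induction f with
  | zero =>
    intro r0 c hw h0 hcw hf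
    rw [pvAWalk, pvDiagR, PySem.List.pyRange_one_eq_nil (by omega), List.filterMap_nil]
  | succ f ih =>
    intro r0 c hw h0 hcw hf
    have hX : 0 ≤ r0 * w := mul_nonneg h0 hw.le
    rw [pvAWalk]
    by_cases hcond : r0 < h ∧ 0 ≤ c
    · rw [if_pos hcond]
      rw [hM r0 c h0 hcond.1 hcond.2 hcw]
      rw [pvDiagR, PySem.List.pyRange_one_cons (by omega), List.filterMap_cons]
      have harg : r0 + c - r0 = c := by ring
      have hrec : pvAWalk matrix h (r0+1) (c-1) f = pvDiagR chars w (r0 + c) (r0+1) h := by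
        have := ih (r0+1) (c-1) hw (by omega) (by omega) (by omega)
        rw [this]
        congr 1
        ring
      unfold pvCell
      rcases lt_or_ge (r0 * w + c) (chars.length : Int) with hin | hout
      · rw [if_pos hin]
        have : PySem.List.pyGet? chars (r0 * w + c) = some (chars[(r0*w+c).toNat]) :=
          PySem.List.pyGet?_eq_some_getElem chars (by omega) hin
        rw [this]
        rw [if_pos (by constructor; omega; rw [harg]; exact hin)]
        rw [harg, this, hrec]
        rfl
      · rw [if_neg (by omega)]
        rw [if_neg (by rw [harg]; omega)]
        rw [hrec]
        rfl
    · rw [if_neg hcond]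
      rw [pvDiagR]
      symm
      rw [List.filterMap_eq_nil_iff]
      intro r hr
      rw [PySem.List.mem_pyRange_one] at hr
      push Not at hcond
      have hc : c < 0 := hcond (by omega)
      rw [if_neg (by omega)]

theorem pvRC_unique {n r c w : Int} (hw : 0 < w) (hc0 : 0 ≤ c) (hcw : c < w) (h : r * w + c = n) :
    r = PySem.Int.floordiv n w ∧ c = PySem.Int.mod n w := by
  have hfd : PySem.Int.floordiv n w = r := by
    rw [PySem.Int.floordiv_eq_iff_of_pos hw]
    constructor
    · omega
    · have : (r + 1) * w = r * w + w := by ring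
      omega
  have hmod := PySem.Int.floordiv_mul_add_mod n w
  rw [hfd] at hmod
  omega

theorem pvFilterMap_update {α : Type} (f g : Int → Option α) (rh : Int) (x : α) :
    ∀ (L : List Int),
    L.Pairwise (· < ·) → rh ∈ L →
    (∀ r ∈ L, r ≠ rh → g r = f r) →
    (∀ r ∈ L, rh < r → g r = none) →
    f rh = none → g rh = some x →
    L.filterMap g = L.filterMap f ++ [x] := by
  intro L
  induction L with
  | nil => intro _ hm; simp at hm
  | cons a L ih =>
    intro hp hm hne hgt hf hg
    rcases List.mem_cons.mp hm with ha | hm'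
    · subst ha
      rw [List.filterMap_cons, List.filterMap_cons, hg, hf]
      have hnilg : L.filterMap g = [] := by
        rw [List.filterMap_eq_nil_iff]
        intro r hr
        exact hgt r (List.mem_cons_of_mem _ hr) ((List.pairwise_cons.mp hp).1 r hr)
      have hnilf : L.filterMap f = [] := by
        rw [List.filterMap_eq_nil_iff]
        intro r hr
        have hlt := (List.pairwise_cons.mp hp).1 r hr
        rw [← hne r (List.mem_cons_of_mem _ hr) (by omega)]
        exact hgt r (List.mem_cons_of_mem _ hr) hlt
      rw [hnilg, hnilf]
      rfl
    · have hane : a ≠ rh := by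
        have := (List.pairwise_cons.mp hp).1 rh hm'
        omega
      rw [List.filterMap_cons, List.filterMap_cons, hne a (List.mem_cons_self) hane]
      have hrec := ih (List.pairwise_cons.mp hp).2 hm'
        (fun r hr hne' => hne r (List.mem_cons_of_mem _ hr) hne')
        (fun r hr hlt => hgt r (List.mem_cons_of_mem _ hr) hlt) hf hg
      cases f a with
      | none => simpa using hrec
      | some y => simp [hrec]

theorem pvBucket_getD (cs : List Char) (w s : Int) :
    ((PySem.List.enumerate cs).foldl
        (fun d p => d.modify (pvBRKey w p.1) [] (fun l => l ++ [p.2]))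
        (PySem.Dict.empty : PySem.Dict Int (List Char))).getD s []
      = pvBucket cs w s := by
  have hmap : (PySem.List.enumerate cs).foldl
        (fun d p => d.modify (pvBRKey w p.1) [] (fun l => l ++ [p.2]))
        (PySem.Dict.empty : PySem.Dict Int (List Char))
      = ((PySem.List.enumerate cs).map (fun p => (pvBRKey w p.1, p.2))).foldl
        (fun d p => d.modify p.1 [] (fun l => l ++ [p.2]))
        (PySem.Dict.empty : PySem.Dict Int (List Char)) := by
    rw [List.foldl_map]
  rw [hmap, PySem.Dict.getD_foldl_modify_append]
  rw [List.filter_map]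
  simp only [List.map_map, PySem.Dict.getD_empty]
  rw [pvBucket]
  simp only [Function.comp_def]
  rfl

theorem pvDiagR_eq_bucket (w s H : Int) (hw : 0 < w) :
    ∀ (cs : List Char), (cs.length : Int) ≤ H * w →
    pvDiagR cs w s (max 0 (s - w + 1)) H = pvBucket cs w s := by
  intro cs
  induction cs using List.reverseRecOn with
  | nil =>
    intro _
    rw [pvDiagR, pvBucket]
    simp only [PySem.List.enumerate, List.filter_nil, List.map_nil]
    rw [List.filterMap_eq_nil_iff]
    intro r hr
    rw [PySem.List.mem_pyRange_one] at hr
    have hr0 : 0 ≤ r := by omega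
    have : 0 ≤ r * w := mul_nonneg hr0 hw.le
    rw [if_neg (by intro hcon; simp at hcon; omega)]
  | append_singleton cs x ih =>
    intro hH
    have hlen : ((cs ++ [x]).length : Int) = (cs.length : Int) + 1 := by simp
    set n : Int := (cs.length : Int) with hn
    have hn0 : 0 ≤ n := by positivity
    have hH' : n ≤ H * w := by omega
    set rh : Int := PySem.Int.floordiv n w with hrh
    set m : Int := PySem.Int.mod n w with hm
    have hm0 : 0 ≤ m := PySem.Int.mod_nonneg n hw
    have hmw : m < w := PySem.Int.mod_lt n hw
    have hnr : rh * w + m = n := PySem.Int.floordiv_mul_add_mod n w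
    have hrh0 : 0 ≤ rh := by
      have := (PySem.Int.le_floordiv_iff_mul_le (a := n) (q := 0) hw).mpr (by omega)
      omega
    -- bucket side: the new pair (n, x) is appended iff its key is s
    have hbucket : pvBucket (cs ++ [x]) w s
        = pvBucket cs w s ++ (if pvBRKey w n = s then [x] else []) := by
      rw [pvBucket, pvBucket, PySem.List.enumerate_append]
      rw [List.filter_append, List.map_append]
      congr 1
      have hsingle : PySem.List.enumerate [x] ((0:Int) + n) = [((0:Int) + n, x)] := rfl
      rw [hsingle]
      by_cases hks : pvBRKey w n = s
      · rw [if_pos hks]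
        simp [hks]
      · rw [if_neg hks]
        simp only [List.filter_cons]
        rw [zero_add]
        simp [hks]
    by_cases hks : pvBRKey w n = s
    · -- the diagonal s gains x at row rh, behind all its other rows
      have hs : rh + m = s := hks
      rw [hbucket, if_pos hks, ← ih hH']
      rw [pvDiagR, pvDiagR, hlen]
      apply pvFilterMap_update _ _ rh x
      · exact PySem.List.pairwise_lt_pyRange_one _ _
      · rw [PySem.List.mem_pyRange_one]
        constructor
        · omega
        · have := (PySem.Int.floordiv_lt_iff_lt_mul (a := n) (q := H) hw).mpr (by omega)
          omega
      · -- away from rh old and new agree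
        intro r hr hne
        rw [PySem.List.mem_pyRange_one] at hr
        by_cases hsr : 0 ≤ s - r
        · have hcw' : s - r < w := by omega
          have hidx0 : 0 ≤ r * w := mul_nonneg (by omega) hw.le
          by_cases hdn : r * w + (s - r) = n
          · exfalso
            have := (pvRC_unique hw hsr hcw' hdn).1
            omega
          · by_cases hlt : r * w + (s - r) < n
            · rw [if_pos ⟨hsr, by omega⟩, if_pos ⟨hsr, hlt⟩]
              rw [PySem.List.pyGet?_of_nonneg _ (by omega), PySem.List.pyGet?_of_nonneg _ (by omega)]
              rw [List.getElem?_append_left (by omega)]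
            · rw [if_neg (by omega), if_neg (by omega)]
        · rw [if_neg (by omega), if_neg (by omega)]
      · -- beyond rh the new function is still none
        intro r hr hgt
        rw [PySem.List.mem_pyRange_one] at hr
        by_cases hsr : 0 ≤ s - r
        · have hcw' : s - r < w := by omega
          have hexp : (r - rh) * (w - 1) = r * w - r - rh * w + rh := by ring
          have hnn : 0 ≤ (r - rh) * (w - 1) := mul_nonneg (by omega) (by omega)
          have hge : n ≤ r * w + (s - r) := by
            rw [hexp] at hnn
            omega
          by_cases hdn : r * w + (s - r) = n
          · exfalso
            have := (pvRC_unique hw hsr hcw' hdn).1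
            omega
          · rw [if_neg (by omega)]
        · rw [if_neg (by omega)]
      · rw [if_neg (by omega)]
      · rw [if_pos ⟨by omega, by omega⟩]
        have harg : rh * w + (s - rh) = n := by omega
        rw [harg]
        have : cs ++ [x] = cs ++ x :: [] := rfl
        rw [this, hn]
        exact PySem.List.pyGet?_append_length cs [] x
    · -- the diagonal s is untouched by the new character
      rw [hbucket, if_neg hks, List.append_nil, ← ih hH']
      rw [pvDiagR, pvDiagR, hlen]
      apply List.filterMap_congr
      intro r hr
      rw [PySem.List.mem_pyRange_one] at hr
      by_cases hsr : 0 ≤ s - r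
      · have hcw' : s - r < w := by omega
        have hidx0 : 0 ≤ r * w := mul_nonneg (by omega) hw.le
        by_cases hdn : r * w + (s - r) = n
        · exfalso
          rcases pvRC_unique hw hsr hcw' hdn with ⟨h1, h2⟩
          apply hks
          rw [pvBRKey]
          omega
        · by_cases hlt : r * w + (s - r) < n
          · rw [if_pos ⟨hsr, by omega⟩, if_pos ⟨hsr, hlt⟩]
            rw [PySem.List.pyGet?_of_nonneg _ (by omega), PySem.List.pyGet?_of_nonneg _ (by omega)]
            rw [List.getElem?_append_left (by omega)]
          · rw [if_neg (by omega), if_neg (by omega)]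
      · rw [if_neg (by omega), if_neg (by omega)]

theorem pvRange_shift (w h : Int) : PySem.List.pyRange w (w + h - 1) = (PySem.List.pyRange 1 h).map (fun r => r + (w - 1)) := by
  rw [PySem.List.pyRange_one, PySem.List.pyRange_one, List.map_map]
  rw [show w + h - 1 - w = h - 1 from by ring]
  apply List.map_congr_left
  intro k _
  simp only [Function.comp]
  ring

theorem pvPorts_eq (cs : List Char) (w : Int) (hcs : cs ≠ []) (hw : w ≠ 0) :
    ((PySem.List.pyRange (w-1) (-1) (-1)).foldl
        (fun acc sc => acc ++ pvAWalk ((pvAMatrix cs w.toNat 0 (-(PySem.Int.floordiv (-(cs.length : Int)) w)).toNat).1)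
          (-(PySem.Int.floordiv (-(cs.length : Int)) w)) 0 sc (-(PySem.Int.floordiv (-(cs.length : Int)) w)).toNat) [])
      ++ ((PySem.List.pyRange 1 (-(PySem.Int.floordiv (-(cs.length : Int)) w))).foldl
        (fun acc sr => acc ++ pvAWalk ((pvAMatrix cs w.toNat 0 (-(PySem.Int.floordiv (-(cs.length : Int)) w)).toNat).1)
          (-(PySem.Int.floordiv (-(cs.length : Int)) w)) sr (w-1) (-(PySem.Int.floordiv (-(cs.length : Int)) w)).toNat) [])
    = (PySem.List.pyRange (w-1) (-1) (-1) ++ PySem.List.pyRange w (w + (-(PySem.Int.floordiv (-(cs.length : Int)) w)) - 1)).foldl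
        (fun acc s => acc ++ ((PySem.List.enumerate cs).foldl
          (fun d p => d.modify (pvBRKey w p.1) [] (fun l => l ++ [p.2]))
          (PySem.Dict.empty : PySem.Dict Int (List Char))).getD s []) [] := by
  set n : Int := (cs.length : Int) with hn
  set h : Int := -(PySem.Int.floordiv (-n) w) with hh
  have hn1 : 1 ≤ n := by
    have : cs.length ≠ 0 := fun hc => hcs (List.eq_nil_of_length_eq_zero hc)
    omega
  rcases lt_or_gt_of_ne hw with hneg | hpos
  · -- negative width: every range involved is empty, both sides are []
    have hq : 0 ≤ PySem.Int.floordiv (-n) w := by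
      have := PySem.Int.floordiv_neg_neg n (-w)
      rw [neg_neg] at this
      rw [this]
      have := (PySem.Int.le_floordiv_iff_mul_le (a := n) (b := -w) (q := 0) (by omega)).mpr (by omega)
      omega
    have hh0 : h ≤ 0 := by omega
    rw [PySem.List.pyRange_neg_one_eq_nil (by omega), PySem.List.pyRange_one_eq_nil (by omega),
      PySem.List.pyRange_one_eq_nil (by omega)]
    rfl
  · -- positive width
    have hbr : (h - 1) * w < n ∧ n ≤ h * w := by
      have := (PySem.Int.neg_floordiv_neg_eq_iff_of_pos (a := n) (b := w) (q := h) hpos).mp rfl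
      exact this
    have h1 : 1 ≤ h := by
      by_contra hcon
      have hh0 : h ≤ 0 := by omega
      have : h * w ≤ 0 := mul_nonpos_iff.mpr (Or.inr ⟨hh0, hpos.le⟩)
      omega
    have hM := pvCell_lookup cs w h hpos
    -- A side: folds to flatMaps
    rw [PySem.List.foldl_append_eq_flatMap, PySem.List.foldl_append_eq_flatMap,
      PySem.List.foldl_append_eq_flatMap]
    simp only [List.nil_append]
    rw [List.flatMap_append]
    congr 1
    · -- part 1 ↔ diagonals w-1 .. 0
      apply List.flatMap_congr
      intro s hs
      rw [PySem.List.mem_pyRange_neg_one] at hs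
      rw [pvAWalk_eq cs w h _ hM h.toNat 0 s hpos le_rfl (by omega) (by omega)]
      rw [zero_add]
      have hb := pvDiagR_eq_bucket w s h hpos cs (by omega)
      rw [show max 0 (s - w + 1) = 0 from by omega] at hb
      rw [hb, pvBucket_getD cs w s]
    · -- part 2 ↔ diagonals w .. w+h-2
      rw [pvRange_shift w h, List.flatMap_map]
      apply List.flatMap_congr
      intro sr hsr
      rw [PySem.List.mem_pyRange_one] at hsr
      rw [pvAWalk_eq cs w h _ hM h.toNat sr (w-1) hpos (by omega) (by omega) (by omega)]
      have hb := pvDiagR_eq_bucket w (sr + (w-1)) h hpos cs (by omega)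
      rw [show max 0 (sr + (w-1) - w + 1) = sr from by omega] at hb
      rw [hb, pvBucket_getD]


-- ===== VERDICT (by name: the statement is the Claim_ definition above) =====
theorem string_diagonal_transcribe_reverse_spec : Claim_equal_string_diagonal_transcribe_reverse := by
  unfold Claim_equal_string_diagonal_transcribe_reverse
  intro text width hdom hpre
  unfold Spec_string_diagonal_transcribe_reverse
  unfold string_diagonal_transcribe_reverse string_diagonal_transcribe_reverse_alt
  by_cases he : text.toList.isEmpty = true
  · simp only [he, if_true]
  · have hcs : text.toList ≠ [] := by
      intro hq; rw [hq] at he; exact he rfl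
    rcases width with _ | v
    · simp only [he]
      have hw : ((pvCeilSqrt text.toList.length : Nat) : Int) ≠ 0 := by
        have := pvCeilSqrt_pos text.toList.length (List.length_pos_of_ne_nil hcs)
        omega
      exact congrArg String.ofList (pvPorts_eq text.toList _ hcs hw)
    · simp only [he]
      have hv : v ≠ 0 := by
        rcases hpre with hp | hp
        · exfalso; apply hcs; rw [hp]; rfl
        · intro hq; exact hp (by rw [hq])
      exact congrArg String.ofList (pvPorts_eq text.toList v hcs hv)
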